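-- pv_equiv track=rewrite | github.com/abiisnn/Natural-Language-Processing | Practice/14/mostCommonWords.py | createDicLemmas
-- ===== SOURCE A (Python) =====
-- def createDicLemmas(tokensLemmas):
-- 	lemmas = {}
-- 	j = 0
-- 	for i in range(0, len(tokensLemmas)- 2, 3):
-- 		word = tokensLemmas[i]
-- 		tag = tokensLemmas[i+1]
-- 		val = tokensLemmas[i+2]
-- 		l = (word, tag[0].lower())
-- 		lemmas[l] = val
-- 		j = j+1
-- 	return lemmas
-- ===== SOURCE B (Python) =====
-- def createDicLemmas(tokensLemmas):
--     words = tokensLemmas[0::3]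
--     tags = tokensLemmas[1::3]
--     vals = tokensLemmas[2::3]
--     return {(w, t[0].lower()): v for w, t, v in zip(words, tags, vals)}
-- ===== Notes on version B (the rewrite author's own statement) =====
-- stated objective: idiomatic
-- what changed: Replaces the index loop stepping by 3 (range(0, len-2, 3) with three indexed lookups per step) by slicing the input into three strided sequences [0::3], [1::3], [2::3], zipping them into triples, and building the dict with a comprehension; the unused counter j is dropped.
import Mathlib
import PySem

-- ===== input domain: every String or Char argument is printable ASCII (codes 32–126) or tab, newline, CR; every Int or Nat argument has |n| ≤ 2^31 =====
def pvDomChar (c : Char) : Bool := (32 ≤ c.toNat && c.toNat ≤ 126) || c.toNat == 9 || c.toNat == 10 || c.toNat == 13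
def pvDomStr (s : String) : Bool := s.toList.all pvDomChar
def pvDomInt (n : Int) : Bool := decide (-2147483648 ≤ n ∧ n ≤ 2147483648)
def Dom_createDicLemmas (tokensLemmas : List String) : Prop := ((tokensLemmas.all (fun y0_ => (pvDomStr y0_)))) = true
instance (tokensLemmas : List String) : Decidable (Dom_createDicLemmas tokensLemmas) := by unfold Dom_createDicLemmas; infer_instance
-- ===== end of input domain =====

-- B replaces the index loop stepping by 3 with three strided slices zipped into triples and a
-- dict comprehension (objective: idiomatic; same complexity).

-- ===== PORT A =====
def createDicLemmas (tokensLemmas : List String) : List (String × String × String) :=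
  let lemmas :=
    (PySem.List.pyRange 0 ((tokensLemmas.length : Int) - 2) 3).foldl
      (fun (lemmas : PySem.Dict (String × String) String) i =>
        let word := PySem.List.pyGetD tokensLemmas i ""
        let tag := PySem.List.pyGetD tokensLemmas (i + 1) ""
        let val := PySem.List.pyGetD tokensLemmas (i + 2) ""
        -- tag[0]: none = IndexError on an empty tag, excluded by Pre_
        match PySem.Str.pyGet? tag 0 with
        | some c => lemmas.insert (word, PySem.Str.lower (String.ofList [c])) val
        | none => lemmas)
      PySem.Dict.empty
  lemmas.items.map (fun p => (p.1.1, p.1.2, p.2))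

-- ===== PORT B =====
def createDicLemmas_alt (tokensLemmas : List String) : List (String × String × String) :=
  let words := (PySem.List.slice? tokensLemmas (some 0) none 3).getD []
  let tags := (PySem.List.slice? tokensLemmas (some 1) none 3).getD []
  let vals := (PySem.List.slice? tokensLemmas (some 2) none 3).getD []
  let d :=
    (words.zip (tags.zip vals)).foldl
      (fun (d : PySem.Dict (String × String) String) wtv =>
        -- t[0]: none = IndexError on an empty tag, excluded by Pre_
        match PySem.Str.pyGet? wtv.2.1 0 with
        | some c => d.insert (wtv.1, PySem.Str.lower (String.ofList [c])) wtv.2.2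
        | none => d)
      PySem.Dict.empty
  d.items.map (fun p => (p.1.1, p.1.2, p.2))

-- ===== PRECONDITION & SPEC =====
-- Pre_ excludes exactly the inputs where Python raises IndexError: some processed triple has an
-- empty tag string (position 3k+1), on which tag[0] raises in A (and t[0] in B alike).
def Pre_createDicLemmas (tokensLemmas : List String) : Prop :=
  ∀ k : Nat, k < tokensLemmas.length / 3 → tokensLemmas.getD (3 * k + 1) "" ≠ ""
instance (tokensLemmas : List String) : Decidable (Pre_createDicLemmas tokensLemmas) := by
  unfold Pre_createDicLemmas; infer_instance
def pvWitness_createDicLemmas : List String := ["running", "VBG", "run", "Dogs", "NNS", "dog"]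
def Spec_createDicLemmas (tokensLemmas : List String) (out : List (String × String × String)) : Prop := out = createDicLemmas_alt tokensLemmas
instance (tokensLemmas : List String) (out : List (String × String × String)) : Decidable (Spec_createDicLemmas tokensLemmas out) := by unfold Spec_createDicLemmas; infer_instance

-- ===== CLAIM (what is proved, stated in full; the proofs are below) =====
def Claim_equal_createDicLemmas : Prop := ∀ (tokensLemmas : List String), Dom_createDicLemmas tokensLemmas → Pre_createDicLemmas tokensLemmas → Spec_createDicLemmas tokensLemmas (createDicLemmas tokensLemmas)

-- ===== LEMMAS AND PROOFS =====

-- A's range(0, len-2, 3) is the indices 3k for k < len/3.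
theorem pv_pyRange_A (n : Nat) :
    PySem.List.pyRange 0 ((n : Int) - 2) 3 =
      (List.range (n / 3)).map (fun k => ((3 * k : Nat) : Int)) := by
  rw [PySem.List.pyRange_of_pos _ _ (by norm_num)]
  have hc : (if (0:Int) < (n : Int) - 2 then ((((n : Int) - 2) - 0 + 3 - 1)/3).toNat else 0) = n/3 := by
    split_ifs with h <;> omega
  rw [hc]
  apply List.map_congr_left
  intro k _
  push_cast
  ring

theorem pv_filterMap_eq_map {α β : Type} (l : List α) (f : α → Option β) (g : α → β)
    (h : ∀ x ∈ l, f x = some (g x)) : List.filterMap f l = List.map g l := by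
  induction l with
  | nil => rfl
  | cons x xs ih =>
    simp only [List.filterMap_cons, h x (by simp), List.map_cons]
    rw [ih (fun y hy => h y (by simp [hy]))]

theorem pv_slice3 (ts : List String) (a : Nat) :
    (PySem.List.slice? ts (some (a : Int)) none 3).getD [] =
      (List.range ((ts.length - a + 2) / 3)).map (fun k => ts.getD (a + 3 * k) "") := by
  simp only [PySem.List.slice?, PySem.List.sliceIndices]
  norm_num
  simp only [if_neg (show ¬((a:Int) < 0) by omega)]
  have hc : (if ((min (a:Int) (ts.length:Int))) < (ts.length:Int) then
      (((ts.length:Int) - min (a:Int) (ts.length:Int) + 3 - 1)/3).toNat else 0)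
      = (ts.length - a + 2)/3 := by
    split_ifs with h <;> omega
  rw [hc]
  apply pv_filterMap_eq_map
  intro k hk
  rw [List.mem_range] at hk
  have hidx : a + 3*k < ts.length := by omega
  have ht : ((min (a:Int) (ts.length:Int)) + 3*(k:Int)).toNat = a + 3*k := by omega
  rw [ht, List.getElem?_eq_getElem hidx]
  simp

theorem pv_zip3 (ts : List String) :
    (((PySem.List.slice? ts (some 0) none 3).getD []).zip
        ((((PySem.List.slice? ts (some 1) none 3).getD [])).zip
          ((PySem.List.slice? ts (some 2) none 3).getD []))) =
      (List.range (ts.length / 3)).map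
        (fun k => (ts.getD (3 * k) "", ts.getD (3 * k + 1) "", ts.getD (3 * k + 2) "")) := by
  have h0 := pv_slice3 ts 0
  have h1 := pv_slice3 ts 1
  have h2 := pv_slice3 ts 2
  norm_num at h0 h1 h2
  rw [h0, h1, h2]
  apply List.ext_getElem
  · simp; omega
  · intro i hi1 hi2
    simp only [List.getElem_zip, List.getElem_map, List.getElem_range]
    simp only [Prod.mk.injEq]
    simp only [List.getD_eq_getElem?_getD]
    have e1 : 1 + 3*i = 3*i + 1 := by omega
    have e2 : 2 + 3*i = 3*i + 2 := by omega
    rw [e1, e2]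
    simp

-- ===== VERDICT (by name: the statement is the Claim_ definition above) =====
theorem createDicLemmas_spec : Claim_equal_createDicLemmas := by
  intro ts _ _
  unfold Spec_createDicLemmas createDicLemmas createDicLemmas_alt
  simp only [pv_zip3, pv_pyRange_A, List.foldl_map]
  refine congrArg (List.map _) (congrArg PySem.Dict.items ?_)
  apply PySem.List.foldl_congr_mem
  intro d k hk
  simp only [PySem.List.pyGetD_natCast]
  have h1 : ((3 * k : Nat) : Int) + 1 = ((3 * k + 1 : Nat) : Int) := by push_cast; ring
  have h2 : ((3 * k : Nat) : Int) + 2 = ((3 * k + 2 : Nat) : Int) := by push_cast; ring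
  rw [h1, h2]
  simp only [PySem.List.pyGetD_natCast]
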